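-- pv_equiv track=rewrite | github.com/abhisheksms/ds_algo_repo | graphs/jumping_numbers.py | jumping_numbers
-- ===== SOURCE A (Python) =====
-- from collections import deque
--
-- def jumping_numbers(x):
--     """
--     - next jumping numbers to 23 is
--         232 = 23*10 + 2
--         234 = 23*10 + 4
--    - zero based exception: when the last number is zero
--                            we can only use lastdigit + 1
--    - nine based exception: when the last number is nine
--                            we can only use lastdigit - 1
--     """
--     res = []
--     d = deque()
--
--     for i in range(1, 10):
--         if i < x:
--             d.append(i)
--
--     while d:
--         val = d.popleft()
--         res.append(val)
--
--         last_num = val % 10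
--         if last_num != 0:
--             new_val = val*10 + (last_num-1)
--             if new_val < x:
--                 d.append(new_val)
--
--         if last_num != 9:
--             new_val = val*10 + (last_num+1)
--             if new_val < x:
--                 d.append(new_val)
--
--     return res
-- ===== SOURCE B (Python) =====
-- def jumping_numbers(x):
--     """DFS over the jumping-number tree, then sort; BFS order of A equals ascending order."""
--     def gen(v):
--         out = [v]
--         last = v % 10
--         if last != 0 and v * 10 + last - 1 < x:
--             out += gen(v * 10 + last - 1)
--         if last != 9 and v * 10 + last + 1 < x:
--             out += gen(v * 10 + last + 1)
--         return out
--     nums = []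
--     for s in range(1, 10):
--         if s < x:
--             nums += gen(s)
--     return sorted(nums)
-- ===== Notes on version B (the rewrite author's own statement) =====
-- stated objective: alternative
-- what changed: Replaces the deque-based BFS loop with a recursive DFS enumeration of the jumping-number tree followed by a final sort; equivalence rests on the proved fact that A's BFS emission order is exactly ascending numeric order.
import Mathlib
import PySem

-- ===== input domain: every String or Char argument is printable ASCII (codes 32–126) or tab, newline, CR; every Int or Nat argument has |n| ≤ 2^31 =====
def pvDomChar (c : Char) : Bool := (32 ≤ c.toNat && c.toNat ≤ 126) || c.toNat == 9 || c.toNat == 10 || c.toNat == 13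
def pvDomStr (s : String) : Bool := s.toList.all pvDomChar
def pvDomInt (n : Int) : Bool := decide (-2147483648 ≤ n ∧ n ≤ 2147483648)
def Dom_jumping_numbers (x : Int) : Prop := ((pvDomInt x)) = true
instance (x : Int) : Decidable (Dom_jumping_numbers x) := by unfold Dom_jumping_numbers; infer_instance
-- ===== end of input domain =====

-- B replaces A's deque BFS by a recursive DFS over the jumping-number tree plus a final sort
-- (objective: alternative decomposition; A's BFS emission order is proved to equal ascending order).

-- ===== PORT A =====
-- the while-d loop of A; fuel makes the recursion structural (one unit per popped element;
-- x.toNat + 9 is proved sufficient below)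
def jnLoop (x : Int) : Nat → List Int → List Int → List Int
  | 0, _, res => res
  | _ + 1, [], res => res
  | fuel + 1, val :: d, res =>
      let res1 := res ++ [val]
      let last := PySem.Int.mod val 10
      let d1 := if last ≠ 0 ∧ val * 10 + (last - 1) < x then d ++ [val * 10 + (last - 1)] else d
      let d2 := if last ≠ 9 ∧ val * 10 + (last + 1) < x then d1 ++ [val * 10 + (last + 1)] else d1
      jnLoop x fuel d2 res1

def jumping_numbers (x : Int) : List Int :=
  let d := (PySem.List.pyRange 1 10 1).foldl (fun d i => if i < x then d ++ [i] else d) []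
  jnLoop x (x.toNat + 9) d []

-- ===== PORT B =====
-- the recursive gen(v) of B; fuel makes it structural (x.toNat + 1 is proved sufficient below)
def jnDfs (x : Int) : Nat → Int → List Int
  | 0, _ => []
  | fuel + 1, v =>
      let last := PySem.Int.mod v 10
      ([v] ++ (if last ≠ 0 ∧ v * 10 + (last - 1) < x then jnDfs x fuel (v * 10 + (last - 1)) else []))
        ++ (if last ≠ 9 ∧ v * 10 + (last + 1) < x then jnDfs x fuel (v * 10 + (last + 1)) else [])

def jumping_numbers_alt (x : Int) : List Int :=
  let nums := (PySem.List.pyRange 1 10 1).foldl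
    (fun acc s => if s < x then acc ++ jnDfs x (x.toNat + 1) s else acc) []
  PySem.List.sorted nums (fun v => v) false

-- ===== PRECONDITION & SPEC =====
def Spec_jumping_numbers (x : Int) (out : List Int) : Prop := out = jumping_numbers_alt x
instance (x : Int) (out : List Int) : Decidable (Spec_jumping_numbers x out) := by unfold Spec_jumping_numbers; infer_instance

-- ===== CLAIM (what is proved, stated in full; the proofs are below) =====
def Claim_equal_jumping_numbers : Prop := ∀ (x : Int), Dom_jumping_numbers x → Spec_jumping_numbers x (jumping_numbers x)

-- ===== LEMMAS AND PROOFS =====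

-- the (at most two) children a node pushes, as one list
def jnChildren (x v : Int) : List Int :=
  (if PySem.Int.mod v 10 ≠ 0 ∧ v * 10 + (PySem.Int.mod v 10 - 1) < x then [v * 10 + (PySem.Int.mod v 10 - 1)] else []) ++
  (if PySem.Int.mod v 10 ≠ 9 ∧ v * 10 + (PySem.Int.mod v 10 + 1) < x then [v * 10 + (PySem.Int.mod v 10 + 1)] else [])

-- the queue invariant of A's BFS: elements in [1,x), strictly increasing, all within one decade
def jnInv (x : Int) (q : List Int) : Prop :=
  (∀ v ∈ q, 1 ≤ v ∧ v < x) ∧ q.Pairwise (· < ·) ∧ ∀ u ∈ q, ∀ v ∈ q, v < 10 * u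

-- potential used for the node-count (Nodup) induction
def jnMeas (x : Int) (q : List Int) : Nat := (q.map (fun v => 3 ^ ((x - v).toNat))).sum

theorem jnChildren_mem {x v c : Int} (_hv : 1 ≤ v) (hc : c ∈ jnChildren x v) :
    10 * v ≤ c ∧ c ≤ 10 * v + 9 ∧ c < x := by
  have h0 : 0 ≤ PySem.Int.mod v 10 := PySem.Int.mod_nonneg (a := v) (b := 10) (by norm_num)
  have h10 : PySem.Int.mod v 10 < 10 := PySem.Int.mod_lt (a := v) (b := 10) (by norm_num)
  unfold jnChildren at hc
  rcases List.mem_append.1 hc with h | h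
  · split_ifs at h with hg
    · simp only [List.mem_singleton] at h; subst h
      exact ⟨by omega, by omega, hg.2⟩
    · simp at h
  · split_ifs at h with hg
    · simp only [List.mem_singleton] at h; subst h
      exact ⟨by omega, by omega, hg.2⟩
    · simp at h

theorem jnChildren_pairwise (x v : Int) : (jnChildren x v).Pairwise (· < ·) := by
  unfold jnChildren
  split_ifs <;> simp

theorem jnLoop_step (x : Int) (f : Nat) (v : Int) (d res : List Int) :
    jnLoop x (f + 1) (v :: d) res = jnLoop x f (d ++ jnChildren x v) (res ++ [v]) := by
  simp only [jnLoop, jnChildren]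
  split_ifs <;> simp

theorem jnDfs_step (x : Int) (f : Nat) (v : Int) :
    jnDfs x (f + 1) v = v :: (jnChildren x v).flatMap (jnDfs x f) := by
  simp only [jnDfs, jnChildren]
  split_ifs <;> simp

theorem jnDfs_fuel (x : Int) : ∀ (f1 f2 : Nat) (v : Int), 1 ≤ v → v < x →
    (x - v).toNat ≤ f1 → (x - v).toNat ≤ f2 → jnDfs x f1 v = jnDfs x f2 v := by
  intro f1
  induction f1 using Nat.strong_induction_on with
  | _ f1 ih =>
    intro f2 v hv hvx h1 h2
    cases f1 with
    | zero => omega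
    | succ a =>
      cases f2 with
      | zero => omega
      | succ b =>
        rw [jnDfs_step, jnDfs_step]
        congr 1
        apply List.flatMap_congr
        intro c hc
        obtain ⟨hc1, hc2, hc3⟩ := jnChildren_mem hv hc
        exact ih a (by omega) b c (by omega) hc3 (by omega) (by omega)

theorem jnDfs_mem (x : Int) : ∀ (f : Nat) (v : Int), 1 ≤ v → v < x →
    ∀ y ∈ jnDfs x f v, v ≤ y ∧ y < x := by
  intro f
  induction f with
  | zero => intro v _ _ y hy; simp [jnDfs] at hy
  | succ a ih =>
    intro v hv hvx y hy
    rw [jnDfs_step] at hy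
    rcases List.mem_cons.1 hy with rfl | hy
    · exact ⟨le_refl _, hvx⟩
    · rcases List.mem_flatMap.1 hy with ⟨c, hc, hyc⟩
      obtain ⟨hc1, _, hcx⟩ := jnChildren_mem hv hc
      have := ih c (by omega) hcx y hyc
      omega

-- node equation for B's DFS at the fuel jumping_numbers_alt uses
theorem jnDfs_node (x v : Int) (hv : 1 ≤ v) (hvx : v < x) :
    jnDfs x (x.toNat + 1) v
      = v :: (jnChildren x v).flatMap (jnDfs x (x.toNat + 1)) := by
  rw [jnDfs_step]
  congr 1
  apply List.flatMap_congr
  intro c hc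
  obtain ⟨hc1, _, hc3⟩ := jnChildren_mem hv hc
  exact jnDfs_fuel x x.toNat (x.toNat + 1) c (by omega) hc3 (by omega) (by omega)

theorem jnInv_step {x v : Int} {d : List Int} (h : jnInv x (v :: d)) :
    jnInv x (d ++ jnChildren x v) := by
  obtain ⟨hb, hp, hr⟩ := h
  obtain ⟨hv1, hvx⟩ := hb v (List.mem_cons_self ..)
  have hvd : ∀ u ∈ d, v < u := (List.pairwise_cons.1 hp).1
  have hpd : d.Pairwise (· < ·) := (List.pairwise_cons.1 hp).2
  refine ⟨?_, ?_, ?_⟩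
  · intro u hu
    rcases List.mem_append.1 hu with h | h
    · exact hb u (List.mem_cons_of_mem _ h)
    · obtain ⟨h1, _, h3⟩ := jnChildren_mem hv1 h
      exact ⟨by omega, h3⟩
  · rw [List.pairwise_append]
    refine ⟨hpd, jnChildren_pairwise x v, ?_⟩
    intro u hu c hc
    obtain ⟨h1, _, _⟩ := jnChildren_mem hv1 hc
    have := hr v (List.mem_cons_self ..) u (List.mem_cons_of_mem _ hu)
    omega
  · intro u hu w hw
    rcases List.mem_append.1 hu with hu' | hu' <;> rcases List.mem_append.1 hw with hw' | hw'
    · exact hr u (List.mem_cons_of_mem _ hu') w (List.mem_cons_of_mem _ hw')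
    · obtain ⟨_, h2, _⟩ := jnChildren_mem hv1 hw'
      have := hvd u hu'
      omega
    · obtain ⟨h1, _, _⟩ := jnChildren_mem hv1 hu'
      have := hr v (List.mem_cons_self ..) w (List.mem_cons_of_mem _ hw')
      have := hb v (List.mem_cons_self ..)
      omega
    · obtain ⟨h1, _, _⟩ := jnChildren_mem hv1 hu'
      obtain ⟨_, h2, _⟩ := jnChildren_mem hv1 hw'
      omega

theorem jnPow_two_lt (e : Nat) (he : 10 ≤ e) : 3 ^ (e - 9) + 3 ^ (e - 9) < 3 ^ e := by
  have h : e - 9 + 9 = e := by omega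
  calc 3 ^ (e - 9) + 3 ^ (e - 9) = 3 ^ (e - 9) * 2 := by ring
    _ < 3 ^ (e - 9) * 3 ^ 9 := by
        have h3 : 0 < 3 ^ (e - 9) := pow_pos (by norm_num) _
        nlinarith
    _ = 3 ^ e := by rw [← Nat.pow_add, h]

theorem jnMeas_step {x v : Int} {d : List Int} (h : jnInv x (v :: d)) :
    jnMeas x (d ++ jnChildren x v) < jnMeas x (v :: d) := by
  obtain ⟨hb, _, _⟩ := h
  obtain ⟨hv1, hvx⟩ := hb v (List.mem_cons_self ..)
  have hkey : jnMeas x (jnChildren x v) < 3 ^ ((x - v).toNat) := by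
    have hch : ∀ c ∈ jnChildren x v,
        (3:ℕ) ^ ((x - c).toNat) ≤ (3:ℕ) ^ ((x - v).toNat - 9) ∧ 10 ≤ (x - v).toNat := by
      intro c hc
      obtain ⟨h1, _, h3⟩ := jnChildren_mem hv1 hc
      exact ⟨Nat.pow_le_pow_right (by norm_num) (by omega), by omega⟩
    unfold jnChildren at hch ⊢
    split_ifs at hch ⊢ with g1 g2 g2
    · have a1 := hch (v * 10 + (PySem.Int.mod v 10 - 1)) (by simp)
      have a2 := hch (v * 10 + (PySem.Int.mod v 10 + 1)) (by simp)
      simp only [jnMeas, List.map_append, List.map_cons, List.map_nil, List.sum_append,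
        List.sum_cons, List.sum_nil]
      have := jnPow_two_lt ((x - v).toNat) a1.2
      omega
    · have a1 := hch (v * 10 + (PySem.Int.mod v 10 - 1)) (by simp)
      have hlt : (3:ℕ) ^ ((x - (v * 10 + (PySem.Int.mod v 10 - 1))).toNat) < 3 ^ ((x - v).toNat) :=
        lt_of_le_of_lt a1.1 (lt_of_le_of_lt (Nat.le_add_left _ _) (jnPow_two_lt _ a1.2))
      simp only [jnMeas, List.append_nil, List.map_cons, List.map_nil, List.sum_cons, List.sum_nil]
      simpa using hlt
    · have a1 := hch (v * 10 + (PySem.Int.mod v 10 + 1)) (by simp)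
      have hlt : (3:ℕ) ^ ((x - (v * 10 + (PySem.Int.mod v 10 + 1))).toNat) < 3 ^ ((x - v).toNat) :=
        lt_of_le_of_lt a1.1 (lt_of_le_of_lt (Nat.le_add_left _ _) (jnPow_two_lt _ a1.2))
      simp only [jnMeas, List.nil_append, List.map_cons, List.map_nil, List.sum_cons, List.sum_nil]
      simpa using hlt
    · simp only [jnMeas, List.append_nil, List.map_nil, List.sum_nil]
      exact pow_pos (by norm_num : (0:ℕ) < 3) _
  simp only [jnMeas, List.map_append, List.sum_append, List.map_cons, List.sum_cons] at *
  omega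

-- every DFS value under the new queue is strictly above the popped head
theorem jnFlat_lt (x v : Int) (d : List Int) (h : jnInv x (v :: d)) :
    ∀ y ∈ (d ++ jnChildren x v).flatMap (jnDfs x (x.toNat + 1)), v < y := by
  obtain ⟨hb, hp, _⟩ := h
  obtain ⟨hv1, hvx⟩ := hb v (List.mem_cons_self ..)
  intro y hy
  rcases List.mem_flatMap.1 hy with ⟨u, hu, hyu⟩
  rcases List.mem_append.1 hu with hu' | hu'
  · obtain ⟨hu1, hux⟩ := hb u (List.mem_cons_of_mem _ hu')
    have h1 := (jnDfs_mem x (x.toNat + 1) u hu1 hux y hyu).1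
    have h2 := (List.pairwise_cons.1 hp).1 u hu'
    omega
  · obtain ⟨h1, _, h3⟩ := jnChildren_mem hv1 hu'
    have h4 := (jnDfs_mem x (x.toNat + 1) u (by omega) h3 y hyu).1
    omega

theorem jnFlat_perm (x v : Int) (d : List Int) (hv : 1 ≤ v) (hvx : v < x) :
    ((v :: d).flatMap (jnDfs x (x.toNat + 1))).Perm
      (v :: (d ++ jnChildren x v).flatMap (jnDfs x (x.toNat + 1))) := by
  rw [List.flatMap_cons, jnDfs_node x v hv hvx, List.flatMap_append]
  simp only [List.cons_append]
  exact List.Perm.cons v List.perm_append_comm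

theorem jnFlat_nodup (x : Int) : ∀ (n : Nat) (q : List Int), jnInv x q → jnMeas x q ≤ n →
    (q.flatMap (jnDfs x (x.toNat + 1))).Nodup := by
  intro n
  induction n with
  | zero =>
    intro q hq hm
    cases q with
    | nil => simp
    | cons v d =>
      exfalso
      simp only [jnMeas, List.map_cons, List.sum_cons] at hm
      have := pow_pos (show 0 < 3 by norm_num) ((x - v).toNat)
      omega
  | succ n ih =>
    intro q hq hm
    cases q with
    | nil => simp
    | cons v d =>
      obtain ⟨hv1, hvx⟩ := hq.1 v (List.mem_cons_self ..)
      have hperm := jnFlat_perm x v d hv1 hvx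
      refine hperm.nodup_iff.2 (List.nodup_cons.2 ⟨?_, ?_⟩)
      · intro hmem
        exact absurd rfl (ne_of_gt (jnFlat_lt x v d hq v hmem)).symm
      · exact ih _ (jnInv_step hq) (by have := jnMeas_step hq; omega)

theorem jnLoop_res (x : Int) : ∀ (f : Nat) (q res : List Int),
    jnLoop x f q res = res ++ jnLoop x f q [] := by
  intro f
  induction f with
  | zero => intro q res; simp [jnLoop]
  | succ a ih =>
    intro q res
    cases q with
    | nil => simp [jnLoop]
    | cons v d =>
      rw [jnLoop_step, jnLoop_step, ih (d ++ jnChildren x v) (res ++ [v]),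
        ih (d ++ jnChildren x v) ([] ++ [v])]
      simp

-- MAIN: under the invariant, A's BFS output is a strictly increasing permutation of B's DFS forest
theorem jnMain (x : Int) : ∀ (f : Nat) (q : List Int), jnInv x q →
    (q.flatMap (jnDfs x (x.toNat + 1))).length ≤ f →
    (jnLoop x f q []).Perm (q.flatMap (jnDfs x (x.toNat + 1)))
      ∧ (jnLoop x f q []).Pairwise (· < ·) := by
  intro f
  induction f with
  | zero =>
    intro q hq hlen
    have : q.flatMap (jnDfs x (x.toNat + 1)) = [] := List.length_eq_zero_iff.1 (by omega)
    simp [jnLoop, this]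
  | succ a ih =>
    intro q hq hlen
    cases q with
    | nil => simp [jnLoop]
    | cons v d =>
      obtain ⟨hv1, hvx⟩ := hq.1 v (List.mem_cons_self ..)
      have hperm := jnFlat_perm x v d hv1 hvx
      have hlen' : ((d ++ jnChildren x v).flatMap (jnDfs x (x.toNat + 1))).length ≤ a := by
        have := hperm.length_eq
        simp only [List.length_cons] at this
        omega
      obtain ⟨ihp, ihpw⟩ := ih (d ++ jnChildren x v) (jnInv_step hq) hlen'
      rw [jnLoop_step, jnLoop_res]
      constructor
      · simp only [List.nil_append, List.cons_append, List.nil_append]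
        exact (List.Perm.cons v ihp).trans hperm.symm
      · simp only [List.nil_append, List.cons_append]
        refine List.pairwise_cons.2 ⟨?_, ihpw⟩
        intro y hy
        exact jnFlat_lt x v d hq y (ihp.mem_iff.1 hy)

theorem jnFoldl_filter (x : Int) : ∀ (l acc : List Int),
    l.foldl (fun d i => if i < x then d ++ [i] else d) acc
      = acc ++ l.filter (fun i => decide (i < x)) := by
  intro l
  induction l with
  | nil => intro acc; simp
  | cons i l ih =>
    intro acc
    by_cases h : i < x <;> simp [h, ih]

theorem jnFoldl_flat (x : Int) (F : Int → List Int) : ∀ (l acc : List Int),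
    l.foldl (fun acc s => if s < x then acc ++ F s else acc) acc
      = acc ++ (l.filter (fun s => decide (s < x))).flatMap F := by
  intro l
  induction l with
  | nil => intro acc; simp
  | cons s l ih =>
    intro acc
    by_cases h : s < x <;> simp [h, ih]

theorem jnInv_init (x : Int) :
    jnInv x ((PySem.List.pyRange 1 10 1).filter (fun i => decide (i < x))) := by
  have hmem : ∀ i ∈ (PySem.List.pyRange 1 10 1).filter (fun i => decide (i < x)),
      1 ≤ i ∧ i < 10 ∧ i < x := by
    intro i hi
    have h1 := List.mem_filter.1 hi
    have h2 := PySem.List.mem_pyRange_one.1 h1.1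
    have h3 := of_decide_eq_true h1.2
    exact ⟨h2.1, h2.2, h3⟩
  refine ⟨fun v hv => ⟨(hmem v hv).1, (hmem v hv).2.2⟩, ?_, ?_⟩
  · exact List.Pairwise.filter _ (PySem.List.pairwise_lt_pyRange_one 1 10)
  · intro u hu w hw
    have h1 := hmem u hu
    have h2 := hmem w hw
    omega

-- ===== VERDICT (by name: the statement is the Claim_ definition above) =====
theorem jumping_numbers_spec : Claim_equal_jumping_numbers := by
  intro x _
  unfold Spec_jumping_numbers jumping_numbers jumping_numbers_alt
  rw [jnFoldl_filter, jnFoldl_flat]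
  simp only [List.nil_append]
  set L := ((PySem.List.pyRange 1 10 1).filter (fun s => decide (s < x))).flatMap
    (jnDfs x (x.toNat + 1)) with hL
  have hnodup : L.Nodup := jnFlat_nodup x _ _ (jnInv_init x) (le_refl _)
  have hsub : ∀ y ∈ L, y ∈ Finset.Icc (1 : ℤ) (x - 1) := by
    intro y hy
    rcases List.mem_flatMap.1 hy with ⟨u, hu, hyu⟩
    obtain ⟨hu1, hux⟩ := (jnInv_init x).1 u hu
    have := jnDfs_mem x (x.toNat + 1) u hu1 hux y hyu
    rw [Finset.mem_Icc]
    omega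
  have hlen : L.length ≤ x.toNat + 9 := by
    have h1 : L.toFinset.card = L.length := List.toFinset_card_of_nodup hnodup
    have h2 : L.toFinset ⊆ Finset.Icc (1 : ℤ) (x - 1) := by
      intro y hy
      exact hsub y (List.mem_toFinset.1 hy)
    have h3 := Finset.card_le_card h2
    rw [Int.card_Icc] at h3
    omega
  obtain ⟨hperm, hpw⟩ := jnMain x (x.toNat + 9) _ (jnInv_init x) hlen
  exact (PySem.List.sorted_eq_of_perm_of_pairwise_lt _ _ (fun v : Int => v) hperm hpw).symm
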